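-- pv_equiv track=rewrite | github.com/eaglesfrogs/adventofcode2023 | day15/day15-2.py | calculate_code_num
-- ===== SOURCE A (Python) =====
-- def calculate_code_num(code):
--     num = 0
--
--     for c in code:
--         ascii_num = ord(c)
--
--         num += ascii_num
--         num = num * 17
--         num = num % 256
--
--     return num
-- ===== SOURCE B (Python) =====
-- def calculate_code_num(code):
--     total = 0
--     weight = 17
--     for c in reversed(code):
--         total += ord(c) * weight
--         weight = (weight * 17) % 256
--     return total % 256
-- ===== Notes on version B (the rewrite author's own statement) =====
-- stated objective: alternative
-- what changed: Replaces the in-place Horner fold that reduces the accumulator every step by a reverse pass accumulating a weighted polynomial sum (each char times a running power of 17 kept mod 256), with the total reduced mod 256 only once at the end.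
import Mathlib
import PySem

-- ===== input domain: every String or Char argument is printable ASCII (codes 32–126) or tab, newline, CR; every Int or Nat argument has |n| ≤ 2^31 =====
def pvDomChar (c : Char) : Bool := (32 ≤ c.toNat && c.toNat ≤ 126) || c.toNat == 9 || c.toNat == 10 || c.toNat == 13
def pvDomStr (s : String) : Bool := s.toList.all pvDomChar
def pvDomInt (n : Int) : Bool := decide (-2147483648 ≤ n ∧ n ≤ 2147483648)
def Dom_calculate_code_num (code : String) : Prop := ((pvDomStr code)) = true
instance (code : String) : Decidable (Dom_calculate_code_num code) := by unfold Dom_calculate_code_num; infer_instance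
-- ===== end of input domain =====

-- B replaces A's per-step Horner/modulo loop by a reverse-order weighted polynomial sum
-- with a single final modulo (objective: alternative decomposition, same cost).

-- ===== PORT A =====
def calculate_code_num (code : String) : Int :=
  code.toList.foldl (fun num c => ((num + (c.toNat : Int)) * 17) % 256) 0

-- ===== PORT B =====
def calculate_code_num_alt (code : String) : Int :=
  (code.toList.reverse.foldl
    (fun (p : Int × Int) c => (p.1 + (c.toNat : Int) * p.2, (p.2 * 17) % 256)) (0, 17)).1 % 256

-- ===== PRECONDITION & SPEC =====
def Spec_calculate_code_num (code : String) (out : Int) : Prop := out = calculate_code_num_alt code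
instance (code : String) (out : Int) : Decidable (Spec_calculate_code_num code out) := by unfold Spec_calculate_code_num; infer_instance

-- ===== CLAIM (what is proved, stated in full; the proofs are below) =====
def Claim_equal_calculate_code_num : Prop := ∀ (code : String), Dom_calculate_code_num code → Spec_calculate_code_num code (calculate_code_num code)

-- ===== LEMMAS AND PROOFS =====

-- reversed Horner value: R (c::t) = ord c + 17 * R t
def pvR : List Char → Int
  | [] => 0
  | c :: t => (c.toNat : Int) + 17 * pvR t

theorem pvR_append (s : List Char) (c : Char) :
    pvR (s ++ [c]) = pvR s + (c.toNat : Int) * 17 ^ s.length := by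
  induction s with
  | nil => simp [pvR]
  | cons x t ih => simp [pvR, ih, pow_succ]; ring

theorem pv_bfold (l : List Char) (t w : Int) :
    (l.foldl (fun (p : Int × Int) c => (p.1 + (c.toNat : Int) * p.2, (p.2 * 17) % 256)) (t, w)).1 % 256
      = (t + w * pvR l) % 256 := by
  induction l generalizing t w with
  | nil => simp [pvR]
  | cons c s ih =>
      simp only [List.foldl_cons, ih, pvR]
      rw [Int.add_emod (t + _), Int.mul_emod, Int.emod_emod_of_dvd _ dvd_rfl,
        ← Int.mul_emod, ← Int.add_emod]
      ring_nf

theorem pv_modlem (a b c m : Int) : (a % m * b + c) % m = (a * b + c) % m := by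
  conv_lhs => rw [Int.add_emod, Int.mul_emod]
  conv_rhs => rw [Int.add_emod, Int.mul_emod]
  simp [Int.emod_emod_of_dvd]

theorem pv_afold (l : List Char) (n : Int) (h0 : 0 ≤ n) (h1 : n < 256) :
    l.foldl (fun num c => ((num + (c.toNat : Int)) * 17) % 256) n
      = (n * 17 ^ l.length + 17 * pvR l.reverse) % 256 := by
  induction l generalizing n with
  | nil =>
      simp [pvR]
      omega
  | cons c t ih =>
      have hn0 : 0 ≤ ((n + (c.toNat : Int)) * 17) % 256 := Int.emod_nonneg _ (by norm_num)
      have hn1 : ((n + (c.toNat : Int)) * 17) % 256 < 256 :=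
        Int.emod_lt_of_pos _ (by norm_num)
      simp only [List.foldl_cons, List.reverse_cons, ih _ hn0 hn1, pvR_append,
        List.length_reverse, List.length_cons]
      rw [pv_modlem]
      ring_nf

theorem calculate_code_num_eq (code : String) :
    calculate_code_num code = calculate_code_num_alt code := by
  unfold calculate_code_num calculate_code_num_alt
  rw [pv_afold _ 0 le_rfl (by norm_num), pv_bfold]
  ring_nf

-- ===== VERDICT (by name: the statement is the Claim_ definition above) =====
theorem calculate_code_num_spec : Claim_equal_calculate_code_num := by
  intro code _
  exact calculate_code_num_eq code
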